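-- pv_equiv track=rewrite | github.com/josephvalencia/bioseq2seq | preprocessing/build_datasets.py | match_length_distribution
-- ===== SOURCE A (Python) =====
-- def match_length_distribution(sample_keys,dataset_b):
--     #list of keys
--     samples_b = []
--     for key in sample_keys:
--         found_neighbor = False
--         sign = 1
--         dist = 1
--         s_key = key
--         while not found_neighbor:
--             try:
--                 samples_b.append(dataset_b[key][0])
--                 found_neighbor = True
--                 del dataset_b[key][0]
--                 if len(dataset_b[key]) == 0:
--                     del dataset_b[key]
--             except KeyError:
--                 key += dist * sign
--                 dist += 1
--                 sign *= -1
--     return samples_b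
-- ===== SOURCE B (Python) =====
-- def match_length_distribution(sample_keys, dataset_b):
--     # Sorted key directory + hand-rolled binary search for the nearest
--     # available key (tie -> larger key); empty buckets stay candidates,
--     # exactly as in A's dict; does not mutate dataset_b.
--     avail = {k: list(v) for k, v in dataset_b.items()}
--     keys = sorted(avail)
--     out = []
--     for key in sample_keys:
--         lo, hi = 0, len(keys)
--         while lo < hi:
--             mid = (lo + hi) // 2
--             if keys[mid] < key:
--                 lo = mid + 1
--             else:
--                 hi = mid
--         if lo == len(keys):
--             j = lo - 1
--         elif lo == 0:
--             j = lo
--         elif keys[lo] - key <= key - keys[lo - 1]: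
--             j = lo
--         else:
--             j = lo - 1
--         k = keys[j]
--         bucket = avail[k]
--         out.append(bucket.pop(0))
--         if not bucket:
--             del avail[k]
--             del keys[j]
--     return out
-- ===== Notes on version B (the rewrite author's own statement) =====
-- stated objective: faster
-- what changed: A spirals outward from each sample key probing dict keys one offset at a time (cost proportional to the numeric gap to the nearest key); B builds one sorted list of the dict's keys and finds the nearest candidate key (tie: larger) by binary search, deleting a key from the sorted list when its bucket drains; B does not mutate dataset_b.
-- outside the precondition, e.g. on match_length_distribution([1], {1: ['a'], 5: []}): A returns ['a'], B returns ['a']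
import Mathlib
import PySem

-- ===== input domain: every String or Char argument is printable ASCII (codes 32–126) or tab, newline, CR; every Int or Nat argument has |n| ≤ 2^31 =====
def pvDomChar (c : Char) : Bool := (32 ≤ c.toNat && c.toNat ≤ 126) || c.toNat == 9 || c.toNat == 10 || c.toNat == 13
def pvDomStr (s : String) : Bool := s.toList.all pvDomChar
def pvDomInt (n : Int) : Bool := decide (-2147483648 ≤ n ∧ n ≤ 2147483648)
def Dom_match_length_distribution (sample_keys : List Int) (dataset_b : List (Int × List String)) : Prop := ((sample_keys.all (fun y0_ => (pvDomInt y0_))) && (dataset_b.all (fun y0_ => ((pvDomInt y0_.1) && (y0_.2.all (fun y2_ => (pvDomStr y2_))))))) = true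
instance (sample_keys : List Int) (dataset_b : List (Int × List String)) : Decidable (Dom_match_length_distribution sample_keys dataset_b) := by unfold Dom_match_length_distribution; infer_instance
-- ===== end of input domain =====

-- B replaces A's outward spiral probe of the dict (cost ~ the numeric gap to the nearest key)
-- by one sorted list of the dict's keys and a binary search per sample key (objective: faster);
-- A mutates its dict argument dataset_b in place, B does not — the equivalence proved here is about
-- the RETURN value only.

-- ===== PORT A =====
-- fuel guard only: an upper bound on the number of probes A's while-loop can make before it
-- reaches every existing key (the spiral reaches all keys within the maximal |key - k|)
def pvFuelA (d : PySem.Dict Int (List String)) (key : Int) : Nat :=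
  2 * d.keys.foldl (fun m k => max m (key - k).natAbs) 0 + 2

def pvSpiralA (d : PySem.Dict Int (List String)) : Int → Int → Int → Nat → Option (Int × List String)
  | _, _, _, 0 => none
  | key, sign, dist, fuel+1 =>
    match d.get? key with
    | some b => some (key, b)                                   -- dataset_b[key] succeeds
    | none => pvSpiralA d (key + dist * sign) (sign * -1) (dist + 1) fuel  -- KeyError branch

def pvStepA (st : PySem.Dict Int (List String) × List String) (key : Int) :
    PySem.Dict Int (List String) × List String :=
  match pvSpiralA st.1 key 1 1 (pvFuelA st.1 key) with
  | none => st                      -- fuel exhausted: Python's while-loop never terminates (outside Pre_)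
  | some (_, []) => st              -- Python raises IndexError on dataset_b[key][0] (outside Pre_)
  | some (k, x :: rest) =>
      (if rest = [] then st.1.erase k else st.1.insert k rest, st.2 ++ [x])

def match_length_distribution (sample_keys : List Int) (dataset_b : List (Int × List String)) : List String :=
  (sample_keys.foldl pvStepA (PySem.Dict.ofList dataset_b, [])).2

-- ===== PORT B =====
-- hand-written bisect_left loop from Source B (while lo < hi: …)
def pvBsearch (keys : List Int) (key : Int) (lo hi : Nat) : Nat :=
  if _h : lo < hi then
    let mid := (lo + hi) / 2
    if keys.getD mid 0 < key then pvBsearch keys key (mid + 1) hi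
    else pvBsearch keys key lo mid
  else lo
termination_by hi - lo
decreasing_by all_goals omega

def pvStepB (st : PySem.Dict Int (List String) × List Int × List String) (key : Int) :
    PySem.Dict Int (List String) × List Int × List String :=
  let avail := st.1
  let keys := st.2.1
  let out := st.2.2
  let lo := pvBsearch keys key 0 keys.length
  let j := if lo = keys.length then lo - 1
           else if lo = 0 then lo
           else if keys.getD lo 0 - key ≤ key - keys.getD (lo - 1) 0 then lo
           else lo - 1
  let k := keys.getD j 0
  match avail.get? k with
  | some (x :: rest) =>
      if rest = [] then (avail.erase k, keys.eraseIdx j, out ++ [x])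
      else (avail.insert k rest, keys, out ++ [x])
  | _ => st      -- Python raises IndexError here (empty bucket, or empty key directory): outside Pre_

def match_length_distribution_alt (sample_keys : List Int) (dataset_b : List (Int × List String)) : List String :=
  let d := PySem.Dict.ofList dataset_b
  let avail := d.items.foldl (fun a kv => a.insert kv.1 kv.2) PySem.Dict.empty
  let keys := PySem.List.sorted avail.keys (fun x => x) false
  (sample_keys.foldl pvStepB (avail, keys, [])).2.2

-- ===== PRECONDITION & SPEC =====
-- Pre_ excludes, for nonempty sample_keys, (a) more sample keys than items in total, where A's
-- while-loop never terminates, and (b) dicts containing an empty-list bucket: if the run's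
-- nearest-key selection ever lands on one, A raises IndexError (and B raises there too, since it
-- keeps the same candidates and the same selection rule), and whether it is reached cannot be
-- read off the input in closed form, so the exclusion is conservative — on excluded inputs where
-- A happens to return, B returns the same value, it is just not proved here.
def Pre_match_length_distribution (sample_keys : List Int) (dataset_b : List (Int × List String)) : Prop :=
  sample_keys = [] ∨
    ((∀ v ∈ (PySem.Dict.ofList dataset_b).values, v ≠ []) ∧
      sample_keys.length ≤ ((PySem.Dict.ofList dataset_b).items.map (fun kv => kv.2.length)).sum)
instance (sample_keys : List Int) (dataset_b : List (Int × List String)) : Decidable (Pre_match_length_distribution sample_keys dataset_b) := by unfold Pre_match_length_distribution; infer_instance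

def pvWitness_match_length_distribution : List Int × (List (Int × List String)) :=
  ([3], [(1, ["a"]), (5, ["b", "c"])])

def Spec_match_length_distribution (sample_keys : List Int) (dataset_b : List (Int × List String)) (out : List String) : Prop := out = match_length_distribution_alt sample_keys dataset_b
instance (sample_keys : List Int) (dataset_b : List (Int × List String)) (out : List String) : Decidable (Spec_match_length_distribution sample_keys dataset_b out) := by unfold Spec_match_length_distribution; infer_instance

-- ===== CLAIM (what is proved, stated in full; the proofs are below) =====
def Claim_equal_match_length_distribution : Prop := ∀ (sample_keys : List Int) (dataset_b : List (Int × List String)), Dom_match_length_distribution sample_keys dataset_b → Pre_match_length_distribution sample_keys dataset_b → Spec_match_length_distribution sample_keys dataset_b (match_length_distribution sample_keys dataset_b)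

-- ===== LEMMAS AND PROOFS =====

-- invariant tying A's dict to B's sorted key directory
def pvInv (d : PySem.Dict Int (List String)) (keys : List Int) : Prop :=
  keys.Pairwise (· < ·) ∧ keys.Perm d.keys ∧ ∀ p ∈ d.items, p.2 ≠ []

def pvTotal (d : PySem.Dict Int (List String)) : Nat :=
  (d.items.map (fun kv => kv.2.length)).sum

lemma pvGetD_mono (keys : List Int) (hs : keys.Pairwise (· ≤ ·)) {i j : Nat}
    (hij : i ≤ j) (hj : j < keys.length) : keys.getD i 0 ≤ keys.getD j 0 := by
  rcases Nat.lt_or_ge i j with h | h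
  · rw [List.getD_eq_getElem keys 0 (by omega), List.getD_eq_getElem keys 0 hj]
    exact (List.pairwise_iff_getElem.mp hs) i j (by omega) hj h
  · have : i = j := by omega
    subst this; exact le_refl _

lemma pvGetD_strict_mono (keys : List Int) (hp : keys.Pairwise (· < ·)) {i j : Nat}
    (hij : i < j) (hj : j < keys.length) : keys.getD i 0 < keys.getD j 0 := by
  rw [List.getD_eq_getElem keys 0 (by omega), List.getD_eq_getElem keys 0 hj]
  exact (List.pairwise_iff_getElem.mp hp) i j (by omega) hj hij

lemma pvBsearch_spec (keys : List Int) (key : Int) (hs : keys.Pairwise (· ≤ ·)) :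
    ∀ fuel lo hi, hi - lo ≤ fuel → hi ≤ keys.length → lo ≤ hi →
    (∀ i, i < lo → keys.getD i 0 < key) →
    (∀ i, hi ≤ i → i < keys.length → key ≤ keys.getD i 0) →
    lo ≤ pvBsearch keys key lo hi ∧ pvBsearch keys key lo hi ≤ hi ∧
    (∀ i, i < pvBsearch keys key lo hi → keys.getD i 0 < key) ∧
    (∀ i, pvBsearch keys key lo hi ≤ i → i < keys.length → key ≤ keys.getD i 0) := by
  intro fuel
  induction fuel with
  | zero =>
    intro lo hi hf hh hlh h1 h2
    have : lo = hi := by omega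
    subst this
    rw [pvBsearch]
    simp only [lt_irrefl, dite_false]
    exact ⟨le_refl _, le_refl _, h1, h2⟩
  | succ f ih =>
    intro lo hi hf hh hlh h1 h2
    rw [pvBsearch]
    by_cases hlt : lo < hi
    · simp only [hlt, dite_true]
      by_cases hc : keys.getD ((lo + hi) / 2) 0 < key
      · simp only [hc, if_true]
        have hr := ih ((lo + hi) / 2 + 1) hi (by omega) hh (by omega)
          (fun i hi' => lt_of_le_of_lt (pvGetD_mono keys hs (by omega) (by omega)) hc) h2
        exact ⟨by omega, hr.2.1, hr.2.2.1, hr.2.2.2⟩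
      · simp only [hc, if_false]
        have hr := ih lo ((lo + hi) / 2) (by omega) (by omega) (by omega) h1
          (fun i hmi hil => le_trans (not_lt.mp hc) (pvGetD_mono keys hs hmi hil))
        exact ⟨hr.1, by omega, hr.2.2.1, hr.2.2.2⟩
    · simp only [hlt, dite_false]
      exact ⟨le_refl _, by omega, h1, fun i hli hil => h2 i (by omega) hil⟩

-- B's index choice picks the nearest element of the sorted key list, ties to the larger key
lemma pvSelect_nearest (keys : List Int) (key : Int) (j : Nat)
    (hne : keys ≠ []) (hp : keys.Pairwise (· < ·))
    (hj : j = (if pvBsearch keys key 0 keys.length = keys.length then pvBsearch keys key 0 keys.length - 1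
               else if pvBsearch keys key 0 keys.length = 0 then pvBsearch keys key 0 keys.length
               else if keys.getD (pvBsearch keys key 0 keys.length) 0 - key ≤
                      key - keys.getD (pvBsearch keys key 0 keys.length - 1) 0 then pvBsearch keys key 0 keys.length
               else pvBsearch keys key 0 keys.length - 1)) :
    j < keys.length ∧
    ∀ k' ∈ keys, (keys.getD j 0 - key).natAbs < (k' - key).natAbs ∨
      ((k' - key).natAbs = (keys.getD j 0 - key).natAbs ∧ k' ≤ keys.getD j 0) := by
  have hlen : 0 < keys.length := List.length_pos_iff.mpr hne
  have hs : keys.Pairwise (· ≤ ·) := hp.imp le_of_lt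
  obtain ⟨-, hrle, hlo, hhi⟩ := pvBsearch_spec keys key hs keys.length 0 keys.length
    (by omega) (le_refl _) (by omega) (fun i h => absurd h (Nat.not_lt_zero i))
    (fun i h1 h2 => absurd (lt_of_le_of_lt h1 h2) (lt_irrefl _))
  set r := pvBsearch keys key 0 keys.length with hr
  have hjlt : j < keys.length := by
    subst hj; split_ifs <;> omega
  refine ⟨hjlt, ?_⟩
  intro k' hk'
  obtain ⟨i, hilt, hik⟩ := List.mem_iff_getElem.mp hk'
  have hik' : k' = keys.getD i 0 := by rw [List.getD_eq_getElem keys 0 hilt, hik]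
  subst hik'
  by_cases hrlen : r = keys.length
  · have hj' : j = keys.length - 1 := by rw [hj]; simp [hrlen]
    have hx : keys.getD i 0 < key := hlo i (by omega)
    have hy : keys.getD j 0 < key := hlo j (by omega)
    have hxy : keys.getD i 0 ≤ keys.getD j 0 := pvGetD_mono keys hs (by omega) hjlt
    omega
  · by_cases hr0 : r = 0
    · have hj' : j = 0 := by rw [hj, if_neg hrlen, if_pos hr0]; exact hr0
      have hy : key ≤ keys.getD j 0 := hhi j (by omega) hjlt
      have hxy : keys.getD j 0 ≤ keys.getD i 0 := pvGetD_mono keys hs (by omega) hilt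
      omega
    · have ha : keys.getD (r - 1) 0 < key := hlo (r - 1) (by omega)
      have hb : key ≤ keys.getD r 0 := hhi r (le_refl _) (by omega)
      by_cases hch : keys.getD r 0 - key ≤ key - keys.getD (r - 1) 0
      · have hj' : j = r := by rw [hj, if_neg hrlen, if_neg hr0, if_pos hch]
        subst hj'
        rcases Nat.lt_or_ge i r with hir | hir
        · have hxa : keys.getD i 0 ≤ keys.getD (r - 1) 0 := pvGetD_mono keys hs (by omega) (by omega)
          omega
        · have hbx : keys.getD r 0 ≤ keys.getD i 0 := pvGetD_mono keys hs hir hilt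
          omega
      · have hj' : j = r - 1 := by rw [hj, if_neg hrlen, if_neg hr0, if_neg hch]
        subst hj'
        rcases Nat.lt_or_ge i r with hir | hir
        · rcases Nat.lt_or_ge i (r - 1) with hir' | hir'
          · have := pvGetD_strict_mono keys hp hir' (by omega)
            have hx : keys.getD i 0 < key := hlo i (by omega)
            omega
          · have : i = r - 1 := by omega
            subst this; omega
        · have hbx : keys.getD r 0 ≤ keys.getD i 0 := pvGetD_mono keys hs hir hilt
          omega

-- A's outward spiral returns exactly the nearest present key (ties to the larger key)
lemma pvSpiral_finds (d : PySem.Dict Int (List String)) (key kstar : Int) (b : List String)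
    (hget : d.get? kstar = some b)
    (hN : ∀ k', d.contains k' = true →
      (kstar - key).natAbs < (k' - key).natAbs ∨
        ((k' - key).natAbs = (kstar - key).natAbs ∧ k' ≤ kstar)) :
    ∀ fuel j : Nat,
    ((∀ k', d.contains k' = true → (k' ≤ key - (j : Int) ∨ key + (j : Int) + 1 ≤ k')) →
      2 * ((kstar - key).natAbs - j) + 1 ≤ fuel →
      pvSpiralA d (key - (j : Int)) 1 (2 * (j : Int) + 1) fuel = some (kstar, b)) ∧
    (1 ≤ j → (∀ k', d.contains k' = true → (k' ≤ key - (j : Int) ∨ key + (j : Int) ≤ k')) →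
      2 * ((kstar - key).natAbs - j) + 2 ≤ fuel →
      pvSpiralA d (key + (j : Int)) (-1) (2 * (j : Int)) fuel = some (kstar, b)) := by
  have hkstar : d.contains kstar = true := by
    rw [PySem.Dict.contains_eq_isSome_get?, hget]; rfl
  intro fuel
  induction fuel with
  | zero => intro j; exact ⟨fun _ h => by omega, fun _ _ h => by omega⟩
  | succ f ih =>
    intro j
    constructor
    · intro hH hfuel
      have hm : (j : Nat) ≤ (kstar - key).natAbs := by
        rcases hH kstar hkstar with h | h <;> omega
      rw [pvSpiralA]
      cases hcase : d.get? (key - (j : Int)) with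
      | some b' =>
        have hc : d.contains (key - (j : Int)) = true := by
          rw [PySem.Dict.contains_eq_isSome_get?, hcase]; rfl
        have heq : kstar = key - (j : Int) := by
          rcases hN _ hc with h | h
          · omega
          · rcases hH kstar hkstar with h2 | h2 <;> omega
        rw [← heq] at hcase
        rw [hget] at hcase
        simp only [Option.some.injEq] at hcase
        rw [heq, hcase]
      | none =>
        have hc : d.contains (key - (j : Int)) = false := by
          rw [PySem.Dict.contains_eq_isSome_get?, hcase]; rfl
        have harg : key - (j : Int) + (2 * (j : Int) + 1) * 1 = key + ((j + 1 : Nat) : Int) := by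
          push_cast; ring
        have hdist : 2 * (j : Int) + 1 + 1 = 2 * ((j + 1 : Nat) : Int) := by push_cast; ring
        have hsign : (1 : Int) * -1 = -1 := by norm_num
        have hne : kstar ≠ key - (j : Int) := by
          intro he; rw [← he] at hcase; rw [hget] at hcase; cases hcase
        have hm1 : j + 1 ≤ (kstar - key).natAbs := by
          rcases hH kstar hkstar with h | h <;> omega
        rw [harg, hsign, hdist]
        apply (ih (j + 1)).2 (by omega)
        · intro k' hk'
          rcases hH k' hk' with h | h
          · left
            rcases eq_or_ne k' (key - (j : Int)) with he | he
            · rw [he] at hk'; rw [hk'] at hc; cases hc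
            · push_cast; omega
          · right; push_cast; omega
        · omega
    · intro hj1 hH hfuel
      have hm : (j : Nat) ≤ (kstar - key).natAbs := by
        rcases hH kstar hkstar with h | h <;> omega
      rw [pvSpiralA]
      cases hcase : d.get? (key + (j : Int)) with
      | some b' =>
        have hc : d.contains (key + (j : Int)) = true := by
          rw [PySem.Dict.contains_eq_isSome_get?, hcase]; rfl
        have heq : kstar = key + (j : Int) := by
          rcases hN _ hc with h | h
          · omega
          · rcases hH kstar hkstar with h2 | h2 <;> omega
        rw [← heq] at hcase
        rw [hget] at hcase
        simp only [Option.some.injEq] at hcase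
        rw [heq, hcase]
      | none =>
        have hc : d.contains (key + (j : Int)) = false := by
          rw [PySem.Dict.contains_eq_isSome_get?, hcase]; rfl
        have harg : key + (j : Int) + 2 * (j : Int) * -1 = key - (j : Int) := by ring
        have hsign : (-1 : Int) * -1 = 1 := by norm_num
        rw [harg, hsign]
        apply (ih j).1
        · intro k' hk'
          rcases hH k' hk' with h | h
          · left; omega
          · right
            rcases eq_or_ne k' (key + (j : Int)) with he | he
            · rw [he] at hk'; rw [hk'] at hc; cases hc
            · omega
        · omega


lemma pvDict_decomp (d : PySem.Dict Int (List String)) (hnd : d.keys.Nodup)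
    (k : Int) (v : List String) (h : d.get? k = some v) :
    ∃ l1 l2, d.items = l1 ++ (k, v) :: l2 ∧ (∀ p ∈ l1, p.1 ≠ k) ∧ (∀ p ∈ l2, p.1 ≠ k) := by
  have hmem : (k, v) ∈ d.items := PySem.Dict.mem_items_of_get?_eq_some d h
  obtain ⟨l1, l2, hitems⟩ := List.append_of_mem hmem
  have hkeys : d.keys = l1.map Prod.fst ++ k :: l2.map Prod.fst := by
    show d.items.map Prod.fst = _
    rw [hitems]; simp
  rw [hkeys] at hnd
  have hnm : k ∉ l1.map Prod.fst ++ l2.map Prod.fst := by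
    have h2 := List.nodup_middle.mp hnd
    rw [List.nodup_cons] at h2
    exact h2.1
  rw [List.mem_append] at hnm
  rw [not_or] at hnm
  refine ⟨l1, l2, hitems, ?_, ?_⟩
  · intro p hp he
    exact hnm.1 (he ▸ List.mem_map_of_mem hp)
  · intro p hp he
    exact hnm.2 (he ▸ List.mem_map_of_mem hp)

lemma pvStep_both (d : PySem.Dict Int (List String)) (keys : List Int)
    (out1 out2 : List String) (key : Int)
    (hinv : pvInv d keys) (htot : 1 ≤ pvTotal d) :
    ∃ d' keys' x,
      pvStepA (d, out1) key = (d', out1 ++ [x]) ∧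
      pvStepB (d, keys, out2) key = (d', keys', out2 ++ [x]) ∧
      pvInv d' keys' ∧ pvTotal d' + 1 = pvTotal d := by
  obtain ⟨hp, hperm, hbuck⟩ := hinv
  have hndk : keys.Nodup := hp.imp (fun h => ne_of_lt h)
  have hnddk : d.keys.Nodup := hperm.nodup_iff.mp hndk
  have hitems_ne : d.items ≠ [] := by
    intro h; unfold pvTotal at htot; rw [h] at htot; simp at htot
  have hkne : keys ≠ [] := by
    intro h
    apply hitems_ne
    have hdk : d.keys = [] := ((h ▸ hperm).symm : d.keys.Perm []).eq_nil
    have : d.items.map Prod.fst = [] := hdk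
    exact List.map_eq_nil_iff.mp this
  -- B's selected key
  obtain ⟨hJlt, hNkeys⟩ := pvSelect_nearest keys key _ hkne hp rfl
  set J := (if pvBsearch keys key 0 keys.length = keys.length then pvBsearch keys key 0 keys.length - 1
            else if pvBsearch keys key 0 keys.length = 0 then pvBsearch keys key 0 keys.length
            else if keys.getD (pvBsearch keys key 0 keys.length) 0 - key ≤
                   key - keys.getD (pvBsearch keys key 0 keys.length - 1) 0 then pvBsearch keys key 0 keys.length
            else pvBsearch keys key 0 keys.length - 1) with hJ
  set k := keys.getD J 0 with hk
  have hkmem : k ∈ keys := by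
    rw [hk, List.getD_eq_getElem keys 0 hJlt]; exact List.getElem_mem hJlt
  have hkdk : k ∈ d.keys := hperm.subset hkmem
  have hcont : d.contains k = true := (PySem.Dict.contains_iff_mem_keys d k).mpr hkdk
  have hget0 : (d.get? k).isSome := by rw [← PySem.Dict.contains_eq_isSome_get?]; exact hcont
  obtain ⟨v, hget⟩ := Option.isSome_iff_exists.mp hget0
  have hvne : v ≠ [] := hbuck (k, v) (PySem.Dict.mem_items_of_get?_eq_some d hget)
  obtain ⟨x, rest, hv⟩ : ∃ x rest, v = x :: rest := by
    cases v with
    | nil => exact absurd rfl hvne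
    | cons a t => exact ⟨a, t, rfl⟩
  subst hv
  -- A's spiral finds the same key
  have hN : ∀ k', d.contains k' = true →
      (k - key).natAbs < (k' - key).natAbs ∨
        ((k' - key).natAbs = (k - key).natAbs ∧ k' ≤ k) := by
    intro k' hk'
    exact hNkeys k' (hperm.mem_iff.mpr ((PySem.Dict.contains_iff_mem_keys d k').mp hk'))
  have hfuel : 2 * ((k - key).natAbs - 0) + 1 ≤ pvFuelA d key := by
    have hb := (PySem.List.le_foldl_max_nat d.keys (fun k' => (key - k').natAbs) 0).2 k hkdk
    unfold pvFuelA
    omega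
  have hsp := (pvSpiral_finds d key k (x :: rest) hget hN (pvFuelA d key) 0).1
    (fun k' _ => by omega) hfuel
  norm_num at hsp
  -- decompose the dict at k
  obtain ⟨l1, l2, hitems, h1, h2⟩ := pvDict_decomp d hnddk k (x :: rest) hget
  have hstepA : pvStepA (d, out1) key =
      (if rest = [] then d.erase k else d.insert k rest, out1 ++ [x]) := by
    simp only [pvStepA, hsp]
  have hstepB : pvStepB (d, keys, out2) key =
      (if rest = [] then (d.erase k, keys.eraseIdx J, out2 ++ [x])
       else (d.insert k rest, keys, out2 ++ [x])) := by
    simp only [pvStepB]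
    rw [← hJ, ← hk, hget]
  have efilter1 : List.filter (fun p => !(p.1 == k)) l1 = l1 :=
    List.filter_eq_self.mpr (fun p hp => by simp [beq_eq_false_iff_ne.mpr (h1 p hp)])
  have efilter2 : List.filter (fun p => !(p.1 == k)) l2 = l2 :=
    List.filter_eq_self.mpr (fun p hp => by simp [beq_eq_false_iff_ne.mpr (h2 p hp)])
  have hdkeys : d.keys = l1.map Prod.fst ++ k :: l2.map Prod.fst := by
    show d.items.map Prod.fst = _
    rw [hitems]; simp
  by_cases hrest : rest = []
  · -- bucket drains: both delete the key
    subst hrest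
    have heitems : (d.erase k).items = l1 ++ l2 := by
      show List.filter (fun p => !(p.1 == k)) d.items = l1 ++ l2
      rw [hitems, List.filter_append, List.filter_cons, efilter1, efilter2]
      simp
    have hekeys : (d.erase k).keys = l1.map Prod.fst ++ l2.map Prod.fst := by
      show (d.erase k).items.map Prod.fst = _
      rw [heitems, List.map_append]
    refine ⟨d.erase k, keys.eraseIdx J, x, ?_, ?_, ?_, ?_⟩
    · rw [hstepA, if_pos rfl]
    · rw [hstepB, if_pos rfl]
    · refine ⟨hp.sublist (List.eraseIdx_sublist keys J), ?_, ?_⟩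
      · have hsplit : keys = keys.take J ++ k :: keys.drop (J + 1) := by
          conv_lhs => rw [← List.take_append_drop J keys]
          rw [List.drop_eq_getElem_cons hJlt]
          rw [hk, List.getD_eq_getElem keys 0 hJlt]
        have h3 : (k :: keys.eraseIdx J).Perm keys := by
          rw [List.eraseIdx_eq_take_drop_succ]
          conv_rhs => rw [hsplit]
          exact List.perm_middle.symm
        have h4 : (k :: ((d.erase k).keys)).Perm d.keys := by
          rw [hekeys, hdkeys]
          exact List.perm_middle.symm
        exact ((h3.trans hperm).trans h4.symm).cons_inv
      · intro p hp'
        apply hbuck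
        rw [hitems]
        rcases List.mem_append.mp (heitems ▸ hp') with h | h
        · exact List.mem_append.mpr (Or.inl h)
        · exact List.mem_append.mpr (Or.inr (List.mem_cons_of_mem _ h))
    · unfold pvTotal
      rw [heitems, hitems]
      simp [List.sum_append]
      omega
  · -- bucket still nonempty: overwrite in place
    have emap1 : l1.map (fun p => if (p.1 == k) = true then (k, rest) else p) = l1 := by
      rw [List.map_congr_left (g := fun a => a)
        (fun p hp => by simp [beq_eq_false_iff_ne.mpr (h1 p hp)])]
      exact List.map_id' l1
    have emap2 : l2.map (fun p => if (p.1 == k) = true then (k, rest) else p) = l2 := by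
      rw [List.map_congr_left (g := fun a => a)
        (fun p hp => by simp [beq_eq_false_iff_ne.mpr (h2 p hp)])]
      exact List.map_id' l2
    have hiitems : (d.insert k rest).items = l1 ++ (k, rest) :: l2 := by
      rw [PySem.Dict.items_insert_of_contains d rest hcont, hitems]
      rw [List.map_append, List.map_cons, emap1, emap2]
      simp
    have hikeys : (d.insert k rest).keys = d.keys := by
      show (d.insert k rest).items.map Prod.fst = d.items.map Prod.fst
      rw [hiitems, hitems]; simp
    refine ⟨d.insert k rest, keys, x, ?_, ?_, ?_, ?_⟩
    · rw [hstepA, if_neg hrest]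
    · rw [hstepB, if_neg hrest]
    · refine ⟨hp, hikeys ▸ hperm, ?_⟩
      intro p hp'
      rw [hiitems] at hp'
      rcases List.mem_append.mp hp' with h | h
      · exact hbuck p (by rw [hitems]; exact List.mem_append.mpr (Or.inl h))
      rcases List.mem_cons.mp h with h | h
      · rw [h]; exact hrest
      · exact hbuck p (by rw [hitems]; exact List.mem_append.mpr (Or.inr (List.mem_cons_of_mem _ h)))
    · unfold pvTotal
      rw [hiitems, hitems]
      simp [List.sum_append]
      omega

lemma pvLoop : ∀ (sk : List Int) (d : PySem.Dict Int (List String)) (keys : List Int)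
    (out : List String), pvInv d keys → sk.length ≤ pvTotal d →
    (sk.foldl pvStepA (d, out)).2 = (sk.foldl pvStepB (d, keys, out)).2.2 := by
  intro sk
  induction sk with
  | nil => intros; rfl
  | cons key tl ih =>
    intro d keys out hinv htot
    obtain ⟨d', keys', x, hA, hB, hinv', htot'⟩ :=
      pvStep_both d keys out out key hinv (by simp at htot; omega)
    simp only [List.foldl_cons, hA, hB]
    exact ih d' keys' (out ++ [x]) hinv' (by simp at htot ⊢; omega)

-- ===== VERDICT (by name: the statement is the Claim_ definition above) =====
theorem match_length_distribution_spec : Claim_equal_match_length_distribution := by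
  unfold Claim_equal_match_length_distribution
  intro sk db _hdom hpre
  rcases hpre with rfl | ⟨hv, hlen⟩
  · rfl
  unfold Spec_match_length_distribution match_length_distribution match_length_distribution_alt
  set d := PySem.Dict.ofList db with hd
  have hbuck : ∀ p ∈ d.items, p.2 ≠ [] := by
    intro p hp
    exact hv p.2 (List.mem_map.mpr ⟨p, hp, rfl⟩)
  have hnd : d.keys.Nodup := PySem.Dict.nodup_keys_ofList db
  have havail : d.items.foldl (fun a kv => a.insert kv.1 kv.2) PySem.Dict.empty = d := by
    apply PySem.Dict.ext
    rw [PySem.Dict.items_foldl_insert_fresh d.items (fun a => a.1) (fun a => a.2)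
      PySem.Dict.empty (fun a _ => PySem.Dict.contains_empty a.1) hnd]
    show PySem.Dict.empty.items ++ _ = _
    rw [show PySem.Dict.empty.items = ([] : List (Int × List String)) from rfl]
    simp
  simp only [havail]
  have hperm0 : (PySem.List.sorted d.keys (fun x => x) false).Perm d.keys :=
    PySem.List.sorted_perm d.keys (fun x => x) false
  have hple : (PySem.List.sorted d.keys (fun x => x) false).Pairwise (· ≤ ·) :=
    PySem.List.sorted_pairwise d.keys (fun x => x)
  have hnd0 : (PySem.List.sorted d.keys (fun x => x) false).Nodup := hperm0.nodup_iff.mpr hnd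
  have hplt : (PySem.List.sorted d.keys (fun x => x) false).Pairwise (· < ·) :=
    (hple.and hnd0).imp (fun h => lt_of_le_of_ne h.1 h.2)
  exact pvLoop sk d (PySem.List.sorted d.keys (fun x => x) false) [] ⟨hplt, hperm0, hbuck⟩ hlen
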